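-- pv_equiv track=rewrite | github.com/foggy-projects/foggy-odoo-bridge | foggy_mcp/lib/foggy/dataset_model/semantic/pivot/domain_transport.py | _find_join_injection_point
-- ===== SOURCE A (Python) =====
-- def _find_join_injection_point(sql: str) -> int:
--     """Find the character position where a new JOIN clause should be inserted.
--
--     The JOIN must go after the FROM clause and any existing JOINs, but
--     before WHERE / GROUP BY / HAVING / ORDER BY / LIMIT.
--
--     Returns the index of the first terminating keyword found (scanning the
--     SQL as uppercase), or ``len(sql)`` if none are found.
--     """
--     sql_upper = sql.upper()
--
--     # Newline-prefixed keywords to avoid false matches inside string literals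
--     terminators = [
--         "\nWHERE ", "\nGROUP BY ", "\nHAVING ",
--         "\nORDER BY ", "\nLIMIT ",
--     ]
--
--     earliest = len(sql)
--     for term in terminators:
--         pos = sql_upper.find(term)
--         if pos != -1 and pos < earliest:
--             earliest = pos
--
--     return earliest
-- ===== SOURCE B (Python) =====
-- def _find_join_injection_point(sql: str) -> int:
--     """Single left-to-right scan: return the first index where any
--     terminating clause keyword starts, or len(sql) if none occurs."""
--     sql_upper = sql.upper()
--     terminators = (
--         "\nWHERE ", "\nGROUP BY ", "\nHAVING ",
--         "\nORDER BY ", "\nLIMIT ",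
--     )
--     for i in range(len(sql_upper)):
--         if sql_upper.startswith(terminators, i):
--             return i
--     return len(sql)
-- ===== Notes on version B (the rewrite author's own statement) =====
-- stated objective: alternative
-- what changed: A runs five independent str.find scans and keeps a running minimum; B makes one left-to-right scan over the uppercased string and returns the first index where any of the five terminators starts (len(sql) if none), using startswith with a tuple.
import Mathlib
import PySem

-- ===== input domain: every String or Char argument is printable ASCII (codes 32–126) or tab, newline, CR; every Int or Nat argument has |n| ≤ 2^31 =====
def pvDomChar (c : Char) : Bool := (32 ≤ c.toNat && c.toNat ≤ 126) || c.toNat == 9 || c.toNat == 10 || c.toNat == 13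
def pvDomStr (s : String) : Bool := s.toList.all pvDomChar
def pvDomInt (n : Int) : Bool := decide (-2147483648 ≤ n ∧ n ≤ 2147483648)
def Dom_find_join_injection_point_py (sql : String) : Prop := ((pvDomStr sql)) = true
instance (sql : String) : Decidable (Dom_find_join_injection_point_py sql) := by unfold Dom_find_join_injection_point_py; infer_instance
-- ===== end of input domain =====

-- B replaces A's five independent str.find passes (with a running minimum) by one
-- left-to-right scan that returns the first index where any terminator starts (objective: alternative).

-- ===== PORT A =====
def find_join_injection_point_py (sql : String) : Int :=
  let sql_upper := PySem.Str.upper sql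
  let terminators : List String :=
    ["\nWHERE ", "\nGROUP BY ", "\nHAVING ", "\nORDER BY ", "\nLIMIT "]
  let earliest : Int := PySem.Str.len sql
  terminators.foldl (fun earliest term =>
    let pos := PySem.Str.find sql_upper term
    if pos ≠ -1 ∧ pos < earliest then pos else earliest) earliest

-- ===== PORT B =====
-- the 'for i in range(len(sql_upper)): if sql_upper.startswith(terminators, i): return i' loop
def pvScanB (terms : List (List Char)) (len : Int) : Nat → List Char → Int
  | _, [] => len
  | i, c :: rest =>
    if terms.any (fun t => t.isPrefixOf (c :: rest)) then (i : Int)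
    else pvScanB terms len (i + 1) rest

def find_join_injection_point_py_alt (sql : String) : Int :=
  let sql_upper := (PySem.Str.upper sql).toList
  let terminators : List (List Char) :=
    ["\nWHERE ".toList, "\nGROUP BY ".toList, "\nHAVING ".toList,
     "\nORDER BY ".toList, "\nLIMIT ".toList]
  pvScanB terminators (PySem.Str.len sql) 0 sql_upper

-- ===== PRECONDITION & SPEC =====
def Spec_find_join_injection_point_py (sql : String) (out : Int) : Prop := out = find_join_injection_point_py_alt sql
instance (sql : String) (out : Int) : Decidable (Spec_find_join_injection_point_py sql out) := by unfold Spec_find_join_injection_point_py; infer_instance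

-- ===== CLAIM (what is proved, stated in full; the proofs are below) =====
def Claim_equal_find_join_injection_point_py : Prop := ∀ (sql : String), Dom_find_join_injection_point_py sql → Spec_find_join_injection_point_py sql (find_join_injection_point_py sql)

-- ===== LEMMAS AND PROOFS =====

-- Facts about A's fold: starting from e₀, the result r satisfies 0 ≤ r ≤ e₀,
-- r < e₀ only if r is the find-position of some processed terminator, and
-- r is ≤ every successful find.
theorem pvFoldFacts (u : List Char) (terms : List (List Char)) :
    ∀ e₀ : Int, 0 ≤ e₀ →
      0 ≤ (terms.foldl (fun e t =>
          if PySem.Chars.find u t ≠ -1 ∧ PySem.Chars.find u t < e then PySem.Chars.find u t else e) e₀) ∧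
      (terms.foldl (fun e t =>
          if PySem.Chars.find u t ≠ -1 ∧ PySem.Chars.find u t < e then PySem.Chars.find u t else e) e₀) ≤ e₀ ∧
      ((terms.foldl (fun e t =>
          if PySem.Chars.find u t ≠ -1 ∧ PySem.Chars.find u t < e then PySem.Chars.find u t else e) e₀) < e₀ →
        ∃ t ∈ terms, PySem.Chars.find u t = (terms.foldl (fun e t =>
          if PySem.Chars.find u t ≠ -1 ∧ PySem.Chars.find u t < e then PySem.Chars.find u t else e) e₀)) ∧
      (∀ t ∈ terms, PySem.Chars.find u t ≠ -1 → (terms.foldl (fun e t =>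
          if PySem.Chars.find u t ≠ -1 ∧ PySem.Chars.find u t < e then PySem.Chars.find u t else e) e₀) ≤ PySem.Chars.find u t) := by
  induction terms with
  | nil =>
    intro e₀ h₀
    exact ⟨h₀, le_refl _, fun h => absurd h (lt_irrefl _), fun t ht => absurd ht List.not_mem_nil⟩
  | cons t ts ih =>
    intro e₀ h₀
    simp only [List.foldl_cons]
    by_cases hg : PySem.Chars.find u t ≠ -1 ∧ PySem.Chars.find u t < e₀
    · rw [if_pos hg]
      have hpos : 0 ≤ PySem.Chars.find u t := by
        have := PySem.Chars.neg_one_le_find u t; omega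
      obtain ⟨h1, h2, h3, h4⟩ := ih (PySem.Chars.find u t) hpos
      refine ⟨h1, le_trans h2 (le_of_lt hg.2), ?_, ?_⟩
      · intro _
        by_cases hlt : (ts.foldl (fun e t =>
            if PySem.Chars.find u t ≠ -1 ∧ PySem.Chars.find u t < e then PySem.Chars.find u t else e)
            (PySem.Chars.find u t)) < PySem.Chars.find u t
        · obtain ⟨t', ht', he⟩ := h3 hlt
          exact ⟨t', List.mem_cons_of_mem _ ht', he⟩
        · exact ⟨t, List.mem_cons_self, by omega⟩
      · intro t' ht' hne
        rcases List.mem_cons.mp ht' with h | h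
        · subst h; exact h2
        · exact h4 t' h hne
    · rw [if_neg hg]
      obtain ⟨h1, h2, h3, h4⟩ := ih e₀ h₀
      refine ⟨h1, h2, ?_, ?_⟩
      · intro hlt
        obtain ⟨t', ht', he⟩ := h3 hlt
        exact ⟨t', List.mem_cons_of_mem _ ht', he⟩
      · intro t' ht' hne
        rcases List.mem_cons.mp ht' with h | h
        · subst h
          have hnlt : ¬ PySem.Chars.find u t' < e₀ := fun hlt => hg ⟨hne, hlt⟩
          omega
        · exact h4 t' h hne

-- B's scan from index i returns m, provided m is the least index at which some
-- terminator is a prefix (m = length if none) and no terminator starts before i.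
theorem pvScanB_eq (terms : List (List Char)) (u : List Char) (m : Int) :
    ∀ (l : List Char) (i : Nat), l = u.drop i → i ≤ u.length →
      (∀ j : Nat, j < i → ¬ ∃ t ∈ terms, t <+: u.drop j) →
      0 ≤ m → m ≤ (u.length : Int) →
      (m < (u.length : Int) → ∃ t ∈ terms, t <+: u.drop m.toNat) →
      (∀ j : Nat, (j : Int) < m → ¬ ∃ t ∈ terms, t <+: u.drop j) →
      pvScanB terms (u.length : Int) i l = m := by
  intro l
  induction l with
  | nil =>
    intro i hl hi hpre h0 hle hP hmin
    have hilen : i = u.length := by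
      have := congrArg List.length hl
      simp only [List.length_nil, List.length_drop] at this
      omega
    simp only [pvScanB]
    by_contra hne
    have hmlt : m < (u.length : Int) := lt_of_le_of_ne hle (fun h => hne h.symm)
    obtain ⟨t, ht, hpref⟩ := hP hmlt
    exact hpre m.toNat (by omega) ⟨t, ht, hpref⟩
  | cons c rest ihl =>
    intro i hl hi hpre h0 hle hP hmin
    have hilt : i < u.length := by
      have := congrArg List.length hl
      simp only [List.length_cons, List.length_drop] at this
      omega
    simp only [pvScanB]
    by_cases hhit : terms.any (fun t => t.isPrefixOf (c :: rest)) = true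
    · rw [if_pos hhit]
      have hPi : ∃ t ∈ terms, t <+: u.drop i := by
        obtain ⟨t, ht, hb⟩ := List.any_eq_true.mp hhit
        exact ⟨t, ht, hl ▸ List.isPrefixOf_iff_prefix.mp hb⟩
      have h1 : m ≤ (i : Int) := by
        by_contra h
        exact hmin i (by omega) hPi
      have h2 : ¬ m < (i : Int) := by
        intro h
        have hm : m < (u.length : Int) := by omega
        obtain ⟨t, ht, hpref⟩ := hP hm
        exact hpre m.toNat (by omega) ⟨t, ht, hpref⟩
      omega
    · rw [if_neg hhit]
      have hdrop : rest = u.drop (i + 1) := by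
        have h := congrArg List.tail hl
        simpa [List.tail_drop] using h
      apply ihl (i + 1) hdrop (by omega) ?_ h0 hle hP hmin
      intro j hj
      rcases Nat.lt_succ_iff_lt_or_eq.mp hj with h | h
      · exact hpre j h
      · subst h
        rintro ⟨t, ht, hpref⟩
        rw [← hl] at hpref
        exact hhit (List.any_eq_true.mpr ⟨t, ht, List.isPrefixOf_iff_prefix.mpr hpref⟩)

-- ===== VERDICT (by name: the statement is the Claim_ definition above) =====
set_option maxHeartbeats 1000000 in
theorem find_join_injection_point_py_spec : Claim_equal_find_join_injection_point_py := by
  intro sql _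
  unfold Spec_find_join_injection_point_py find_join_injection_point_py find_join_injection_point_py_alt
  have hulen : (PySem.Str.upper sql).toList.length = sql.toList.length := by
    simp [PySem.Str.toList_upper, PySem.Chars.upper]
  have hlen : PySem.Str.len sql = (((PySem.Str.upper sql).toList.length : Nat) : Int) := by
    rw [PySem.Str.len_eq, hulen]
  -- the fold over String terminators is the fold over their char lists
  have key : ∀ (ts : List String) (e : Int),
      ts.foldl (fun earliest term =>
        let pos := PySem.Str.find (PySem.Str.upper sql) term
        if pos ≠ -1 ∧ pos < earliest then pos else earliest) e
      = (ts.map String.toList).foldl (fun e t =>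
          if PySem.Chars.find (PySem.Str.upper sql).toList t ≠ -1 ∧
             PySem.Chars.find (PySem.Str.upper sql).toList t < e
          then PySem.Chars.find (PySem.Str.upper sql).toList t else e) e := by
    intro ts e
    simp only [List.foldl_map, PySem.Str.find_eq]
  simp only [key, List.map_cons, List.map_nil, hlen]
  obtain ⟨h0, hle, hwit, hmin⟩ :=
    pvFoldFacts (PySem.Str.upper sql).toList
      ["\nWHERE ".toList, "\nGROUP BY ".toList, "\nHAVING ".toList,
       "\nORDER BY ".toList, "\nLIMIT ".toList]
      (((PySem.Str.upper sql).toList.length : Nat) : Int) (Int.natCast_nonneg _)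
  refine (pvScanB_eq _ _ _ _ 0 rfl (Nat.zero_le _) (fun j hj => absurd hj (Nat.not_lt_zero j))
    h0 hle ?_ ?_).symm
  · intro hlt
    obtain ⟨t, ht, hfind⟩ := hwit hlt
    have hpos : 0 ≤ PySem.Chars.find (PySem.Str.upper sql).toList t := by omega
    have hsp := (PySem.Chars.find_spec hpos).1
    rw [hfind] at hsp
    exact ⟨t, ht, hsp⟩
  · rintro j hj ⟨t, ht, hpref⟩
    have hne : PySem.Chars.find (PySem.Str.upper sql).toList t ≠ -1 := by
      rw [PySem.Chars.find_ne_neg_one_iff]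
      exact hpref.isInfix.trans (List.drop_suffix j _).isInfix
    have hlem := hmin t ht hne
    have hpos : 0 ≤ PySem.Chars.find (PySem.Str.upper sql).toList t := by
      have := PySem.Chars.neg_one_le_find (PySem.Str.upper sql).toList t; omega
    exact (PySem.Chars.find_spec hpos).2 j (by omega) hpref
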